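-- pv_equiv track=rewrite | github.com/cristianedamacena/projeto | projeto/src/round_key/matrizes.py | preenchimento_matriz
-- ===== SOURCE A (Python) =====
-- def preenchimento_matriz(matriz, texto):
--     k = 0
--     for i in range(len(matriz)):
--         for j in range(len(matriz)):
--             if k < len(texto):
--                 matriz[i][j] = texto[k]
--                 k += 1
--     return matriz
-- ===== SOURCE B (Python) =====
-- def preenchimento_matriz(matriz, texto):
--     n = len(matriz)
--     for k in range(min(len(texto), n * n)):
--         i, j = divmod(k, n)
--         matriz[i][j] = texto[k]
--     return matriz
-- ===== Notes on version B (the rewrite author's own statement) =====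
-- stated objective: simpler
-- what changed: Replaces the nested row/column loops with a running assignment counter by one flat loop over k in range(min(len(texto), n*n)) that recovers the cell via divmod(k, n), eliminating the counter and the per-cell guard.
import Mathlib
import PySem

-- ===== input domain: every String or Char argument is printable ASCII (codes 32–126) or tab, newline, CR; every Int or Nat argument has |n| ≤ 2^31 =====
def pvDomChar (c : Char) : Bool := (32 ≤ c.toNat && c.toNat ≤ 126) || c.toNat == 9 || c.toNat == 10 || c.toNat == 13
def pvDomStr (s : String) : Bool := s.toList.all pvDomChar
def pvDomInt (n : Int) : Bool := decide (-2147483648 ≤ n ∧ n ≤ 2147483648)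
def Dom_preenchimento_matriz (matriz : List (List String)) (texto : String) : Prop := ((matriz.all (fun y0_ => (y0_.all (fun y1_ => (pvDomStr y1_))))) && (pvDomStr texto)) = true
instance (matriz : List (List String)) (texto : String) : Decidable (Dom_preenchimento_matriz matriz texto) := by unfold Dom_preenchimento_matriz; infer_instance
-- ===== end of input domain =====

-- B replaces the nested row/column loops and running counter with one flat loop over
-- k < min(len(texto), n*n) using divmod(k, n) for the cell (simpler decomposition).
-- Both A and B mutate `matriz` in place in Python in the same way; the equivalence
-- proved here is about the returned value.

-- ===== PORT A =====
def preenchimento_matriz (matriz : List (List String)) (texto : String) : List (List String) :=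
  let t := texto.toList
  let n := matriz.length
  ((List.range n).foldl (fun (st : List (List String) × Nat) i =>
      (List.range n).foldl (fun st j =>
        if st.2 < t.length then
          (st.1.modify i (fun row => row.set j (String.mk [t.getD st.2 ' '])), st.2 + 1)
        else st) st)
    (matriz, 0)).1

-- ===== PORT B =====
def preenchimento_matriz_alt (matriz : List (List String)) (texto : String) : List (List String) :=
  let t := texto.toList
  let n := matriz.length
  (List.range (min t.length (n * n))).foldl
    (fun mat k => mat.modify (k / n) (fun row => row.set (k % n) (String.mk [t.getD k ' ']))) matriz

-- ===== PRECONDITION & SPEC =====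
-- Pre_ excludes exactly the inputs on which Python A raises IndexError: a cell (i, j)
-- that receives a character (i*n + j < len(texto)) must exist in row i.
def Pre_preenchimento_matriz (matriz : List (List String)) (texto : String) : Prop :=
  ∀ i < matriz.length, ∀ j < matriz.length,
    i * matriz.length + j < texto.length → j < (matriz.getD i []).length
instance (matriz : List (List String)) (texto : String) : Decidable (Pre_preenchimento_matriz matriz texto) := by
  unfold Pre_preenchimento_matriz; infer_instance

def pvWitness_preenchimento_matriz : List (List String) × String := ([["a", "b"], ["c", "d"]], "xy")

def Spec_preenchimento_matriz (matriz : List (List String)) (texto : String) (out : List (List String)) : Prop := out = preenchimento_matriz_alt matriz texto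
instance (matriz : List (List String)) (texto : String) (out : List (List String)) : Decidable (Spec_preenchimento_matriz matriz texto out) := by unfold Spec_preenchimento_matriz; infer_instance

-- ===== CLAIM (what is proved, stated in full; the proofs are below) =====
def Claim_equal_preenchimento_matriz : Prop := ∀ (matriz : List (List String)) (texto : String), Dom_preenchimento_matriz matriz texto → Pre_preenchimento_matriz matriz texto → Spec_preenchimento_matriz matriz texto (preenchimento_matriz matriz texto)

-- ===== LEMMAS AND PROOFS =====

-- One flat-index assignment: write texto[k] into cell (k / n, k % n).
def pvCell (t : List Char) (n : Nat) (mat : List (List String)) (k : Nat) : List (List String) :=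
  mat.modify (k / n) (fun row => row.set (k % n) (String.mk [t.getD k ' ']))

-- A's inner loop over columns j..j+m-1 of row i, entered with counter k = min (i*n+j) |t|,
-- performs exactly the flat assignments k, k+1, …, min (i*n+j+m) |t| - 1.
theorem pv_inner (t : List Char) (n i : Nat) :
    ∀ (m j : Nat) (mat : List (List String)) (k : Nat),
      j + m ≤ n → k = min (i * n + j) t.length →
      (List.range' j m).foldl (fun (st : List (List String) × Nat) jj =>
          if st.2 < t.length then
            (st.1.modify i (fun row => row.set jj (String.mk [t.getD st.2 ' '])), st.2 + 1)
          else st) (mat, k)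
      = ((List.range' k (min (i * n + j + m) t.length - k)).foldl (pvCell t n) mat,
         min (i * n + j + m) t.length) := by
  intro m
  induction m with
  | zero =>
    intro j mat k _ hk
    simp [List.range', hk]
  | succ m ih =>
    intro j mat k hjm hk
    rw [List.range'_succ, List.foldl_cons]
    by_cases hlt : k < t.length
    · have hkeq : k = i * n + j := by omega
      have hjn : j < n := by omega
      have hdiv : k / n = i := by
        subst hkeq
        rw [Nat.add_comm, Nat.add_mul_div_right _ _ (by omega : 0 < n), Nat.div_eq_of_lt hjn]
        omega
      have hmod : k % n = j := by
        subst hkeq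
        rw [Nat.add_comm, Nat.add_mul_mod_self_right, Nat.mod_eq_of_lt hjn]
      simp only [hlt, if_pos]
      have hstep : ((mat, k).1.modify i fun row => row.set j (String.mk [t.getD (mat, k).2 ' ']))
          = pvCell t n mat k := by
        simp [pvCell, hdiv, hmod]
      rw [hstep]
      have hk' : k + 1 = min (i * n + (j + 1)) t.length := by omega
      rw [ih (j + 1) (pvCell t n mat k) (k + 1) (by omega) hk']
      have hL : min (i * n + j + (m + 1)) t.length - k
          = (min (i * n + (j + 1) + m) t.length - (k + 1)) + 1 := by omega
      rw [hL, List.range'_succ, List.foldl_cons]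
      have hm : min (i * n + (j + 1) + m) t.length = min (i * n + j + (m + 1)) t.length := by omega
      rw [hm]
    · have hkt : k = t.length := by omega
      simp only [hlt, ite_false]
      have hk' : k = min (i * n + (j + 1)) t.length := by omega
      rw [ih (j + 1) mat k (by omega) hk']
      have hL : min (i * n + j + (m + 1)) t.length - k
          = min (i * n + (j + 1) + m) t.length - k := by omega
      rw [hL]
      have hm : min (i * n + (j + 1) + m) t.length = min (i * n + j + (m + 1)) t.length := by omega
      rw [hm]

-- A's outer loop over rows i..i+m-1, entered with counter k = min (i*n) |t|, performs
-- exactly the flat assignments k, k+1, …, min ((i+m)*n) |t| - 1.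
theorem pv_outer (t : List Char) (n : Nat) (hn : 0 < n) :
    ∀ (m i : Nat) (mat : List (List String)) (k : Nat),
      k = min (i * n) t.length →
      (List.range' i m).foldl (fun (st : List (List String) × Nat) ii =>
          (List.range n).foldl (fun (st : List (List String) × Nat) j =>
            if st.2 < t.length then
              (st.1.modify ii (fun row => row.set j (String.mk [t.getD st.2 ' '])), st.2 + 1)
            else st) st) (mat, k)
      = ((List.range' k (min ((i + m) * n) t.length - k)).foldl (pvCell t n) mat,
         min ((i + m) * n) t.length) := by
  intro m
  induction m with
  | zero =>
    intro i mat k hk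
    simp [List.range', hk]
  | succ m ih =>
    intro i mat k hk
    rw [List.range'_succ, List.foldl_cons]
    have h1 : k = min (i * n + 0) t.length := by omega
    have hinner := pv_inner t n i n 0 mat k (by omega) h1
    rw [show List.range' 0 n = List.range n from (List.range_eq_range').symm] at hinner
    rw [hinner]
    set a := min (i * n + 0 + n) t.length with ha
    have hin : (i + 1) * n = i * n + n := by ring
    have ha' : a = min ((i + 1) * n) t.length := by omega
    rw [ih (i + 1) _ a ha']
    have him : (i + 1 + m) * n = (i + (m + 1)) * n := by ring
    set b := min ((i + 1 + m) * n) t.length with hb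
    have hka : k ≤ a := by omega
    have hab : a ≤ b := by
      have : (i + 1) * n ≤ (i + 1 + m) * n := Nat.mul_le_mul_right _ (by omega)
      omega
    have hseg : List.range' k (a - k) ++ List.range' (k + 1 * (a - k)) (b - a)
        = List.range' k ((a - k) + (b - a)) := List.range'_append
    have e1 : k + 1 * (a - k) = a := by omega
    have e2 : (a - k) + (b - a) = b - k := by omega
    rw [e1, e2] at hseg
    rw [← List.foldl_append, hseg]
    have hm : b = min ((i + (m + 1)) * n) t.length := by omega
    rw [hm]

-- ===== VERDICT (by name: the statement is the Claim_ definition above) =====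
theorem preenchimento_matriz_spec : Claim_equal_preenchimento_matriz := by
  intro matriz texto _ _
  unfold Spec_preenchimento_matriz preenchimento_matriz preenchimento_matriz_alt
  dsimp only
  by_cases hn : matriz.length = 0
  · simp [hn]
  · have hn' : 0 < matriz.length := Nat.pos_of_ne_zero hn
    have houter := pv_outer texto.toList matriz.length hn' matriz.length 0 matriz 0 (by simp)
    rw [List.range_eq_range'] at houter
    rw [List.range_eq_range' (n := matriz.length), houter]
    have hnn : (0 + matriz.length) * matriz.length = matriz.length * matriz.length := by ring
    have hL : min ((0 + matriz.length) * matriz.length) texto.toList.length - 0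
        = min texto.toList.length (matriz.length * matriz.length) := by omega
    rw [List.range_eq_range' (n := min texto.toList.length (matriz.length * matriz.length))]
    simp only [hL]
    rfl
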